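-- pv_equiv track=rewrite | github.com/Rec0440/binaris_solver | data/row.py | fill_in_row_by_0110or1001
-- ===== SOURCE A (Python) =====
-- def fill_in_row_by_0110or1001(m, x_int):
--     ''' доповнює всі комбінації 00 та 11 на 1001 та 0110 '''
--     comb = ['00*', '11*', '*00', '*11']         # список шуканих комбінацій
--     tick = 0                                    # ітератор комбінацій
--     pos_comb = -1
--     while pos_comb < 0 and tick < 4: # поки не перестанемо знаходити, та не переберем всі комбінації - повторювати
--         pos_comb = m[x_int].find(comb[tick])     # шукаємо комбінацію
--         if pos_comb > -1:                        # якщо комбінація знайдена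
--             if tick in (0, 1):                        # якщо це 00* або 11*
--                 digit = '1' if tick == 0 else '0'         # то присвоїти відповідний символ для заповнення
--                 # якщо 1й або 3й доданки не існують, то доданок поретворюється у ''
--                 m[x_int] = m[x_int][:pos_comb+2] + digit + m[x_int][pos_comb+3:]
--                 pos_comb = -1                             # спробуємо знайти ще раз
--             elif tick in (2, 3):                      # якщо це *00 або *11
--                 digit = '1' if tick == 2 else '0'         # то присвоїти відповідний символ для заповнення
--                 m[x_int] = m[x_int][:pos_comb] + digit + m[x_int][pos_comb+1:]
--                 pos_comb = -1
--         else:                                    # якщо комбінація не знайдена перейти до наступної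
--             tick += 1
--     return m
-- ===== SOURCE B (Python) =====
-- def fill_in_row_by_0110or1001(m, x_int):
--     ''' fills every 00/11 pair toward 1001/0110: one left-to-right scan per pattern '''
--     row = list(m[x_int])
--     n = len(row)
--     for pat, rep in (("00*", "001"), ("11*", "110"), ("*00", "100"), ("*11", "011")):
--         i = 0
--         while i + 3 <= n:
--             if row[i] == pat[0] and row[i + 1] == pat[1] and row[i + 2] == pat[2]:
--                 row[i] = rep[0]
--                 row[i + 1] = rep[1]
--                 row[i + 2] = rep[2]
--                 i += 3
--             else:
--                 i += 1
--     m[x_int] = ''.join(row)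
--     return m
-- ===== Notes on version B (the rewrite author's own statement) =====
-- stated objective: alternative
-- what changed: A re-runs find() from position 0 after every single replacement; B converts the row to a char array once and makes one left-to-right scan per pattern, replacing in place and never restarting.
import Mathlib
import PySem

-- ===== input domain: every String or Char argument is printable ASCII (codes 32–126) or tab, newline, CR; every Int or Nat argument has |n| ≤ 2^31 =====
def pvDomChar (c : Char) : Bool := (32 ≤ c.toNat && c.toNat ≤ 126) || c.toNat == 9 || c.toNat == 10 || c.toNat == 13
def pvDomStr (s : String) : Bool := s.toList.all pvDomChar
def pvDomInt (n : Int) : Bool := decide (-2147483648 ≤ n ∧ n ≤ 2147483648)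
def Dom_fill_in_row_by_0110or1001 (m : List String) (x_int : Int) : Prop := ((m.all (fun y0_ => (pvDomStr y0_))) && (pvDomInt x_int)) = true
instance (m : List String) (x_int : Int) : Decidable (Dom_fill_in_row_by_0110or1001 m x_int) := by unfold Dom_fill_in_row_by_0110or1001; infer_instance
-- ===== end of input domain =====

-- B replaces A's restart-after-every-replacement find loop by one left-to-right scan per
-- pattern over a char array (objective: alternative). Both A and B mutate m[x_int] in place and
-- return m; the theorems below are about the returned value.

-- ===== PORT A =====

-- the list comb = ['00*', '11*', '*00', '*11'] (as char lists)
def pvComb : Nat → List Char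
  | 0 => ['0', '0', '*']
  | 1 => ['1', '1', '*']
  | 2 => ['*', '0', '0']
  | _ => ['*', '1', '1']

-- lemmas cited by pvLoopA's decreasing_by: a successful find decomposes the string,
-- and each of A's two slice surgeries removes one '*'
theorem pvFindDecomp (s pat : List Char) (h : -1 < PySem.Chars.find s pat) :
    s = s.take (PySem.Chars.find s pat).toNat ++ pat ++
        s.drop ((PySem.Chars.find s pat).toNat + pat.length) := by
  have h0 : 0 ≤ PySem.Chars.find s pat := by omega
  obtain ⟨hpre, -⟩ := PySem.Chars.find_spec (s := s) (sub := pat) h0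
  obtain ⟨t, ht⟩ := hpre
  have hdrop : s.drop ((PySem.Chars.find s pat).toNat + pat.length) = t := by
    have h2 : s.drop ((PySem.Chars.find s pat).toNat + pat.length)
        = (s.drop (PySem.Chars.find s pat).toNat).drop pat.length := by
      rw [List.drop_drop, Nat.add_comm]
    rw [h2, ← ht, List.drop_left]
  rw [hdrop, List.append_assoc, ht, List.take_append_drop]

theorem pvFindLen (s pat : List Char) (h : -1 < PySem.Chars.find s pat) :
    (PySem.Chars.find s pat).toNat + pat.length ≤ s.length := by
  have h0 : 0 ≤ PySem.Chars.find s pat := by omega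
  obtain ⟨hpre, -⟩ := PySem.Chars.find_spec (s := s) (sub := pat) h0
  have hl := hpre.length_le
  have hfl := PySem.Chars.find_le_length (s := s) (sub := pat)
  simp [List.length_drop] at hl
  omega

theorem pvSliceLeft (s : List Char) (a b d : Char) (h : -1 < PySem.Chars.find s [a, b, '*']) :
    PySem.List.slice s none (some (PySem.Chars.find s [a, b, '*'] + 2)) ++ [d] ++
      PySem.List.slice s (some (PySem.Chars.find s [a, b, '*'] + 3)) none
    = s.take (PySem.Chars.find s [a, b, '*']).toNat ++ [a, b, d] ++
      s.drop ((PySem.Chars.find s [a, b, '*']).toNat + 3) := by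
  have h0 : 0 ≤ PySem.Chars.find s [a, b, '*'] := by omega
  have hlen := pvFindLen s [a, b, '*'] h
  have hs := pvFindDecomp s [a, b, '*'] h
  norm_num at hlen hs
  rw [PySem.List.slice_to s (b := PySem.Chars.find s [a, b, '*'] + 2) (by omega),
      PySem.List.slice_from s (a := PySem.Chars.find s [a, b, '*'] + 3) (by omega),
      show (PySem.Chars.find s [a, b, '*'] + 2).toNat = (PySem.Chars.find s [a, b, '*']).toNat + 2 by omega,
      show (PySem.Chars.find s [a, b, '*'] + 3).toNat = (PySem.Chars.find s [a, b, '*']).toNat + 3 by omega]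
  set n := (PySem.Chars.find s [a, b, '*']).toNat with hn
  set u := s.take n with hu2
  set t := s.drop (n + 3) with ht2
  have hul : u.length = n := by rw [hu2, List.length_take]; omega
  rw [hs, show n + 2 = u.length + 2 from by rw [hul], List.append_assoc,
      List.take_length_add_append]
  simp

theorem pvSliceRight (s : List Char) (b c d : Char) (h : -1 < PySem.Chars.find s ['*', b, c]) :
    PySem.List.slice s none (some (PySem.Chars.find s ['*', b, c])) ++ [d] ++
      PySem.List.slice s (some (PySem.Chars.find s ['*', b, c] + 1)) none
    = s.take (PySem.Chars.find s ['*', b, c]).toNat ++ [d, b, c] ++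
      s.drop ((PySem.Chars.find s ['*', b, c]).toNat + 3) := by
  have h0 : 0 ≤ PySem.Chars.find s ['*', b, c] := by omega
  have hlen := pvFindLen s ['*', b, c] h
  have hs := pvFindDecomp s ['*', b, c] h
  norm_num at hlen hs
  rw [PySem.List.slice_to s (b := PySem.Chars.find s ['*', b, c]) h0,
      PySem.List.slice_from s (a := PySem.Chars.find s ['*', b, c] + 1) (by omega),
      show (PySem.Chars.find s ['*', b, c] + 1).toNat = (PySem.Chars.find s ['*', b, c]).toNat + 1 by omega]
  set n := (PySem.Chars.find s ['*', b, c]).toNat with hn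
  set u := s.take n with hu2
  set t := s.drop (n + 3) with ht2
  have hul : u.length = n := by rw [hu2, List.length_take]; omega
  rw [show s.drop (n + 1) = [b, c] ++ t from by
        rw [hs, show n + 1 = u.length + 1 from by rw [hul], List.drop_length_add_append]
        simp]
  simp

theorem pvCountLeft (s : List Char) (a b d : Char) (ha : a ≠ '*') (hb : b ≠ '*') (hd : d ≠ '*')
    (h : -1 < PySem.Chars.find s [a, b, '*']) :
    (s.take (PySem.Chars.find s [a, b, '*']).toNat ++ [a, b, d] ++
      s.drop ((PySem.Chars.find s [a, b, '*']).toNat + 3)).count '*' < s.count '*' := by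
  have hs := pvFindDecomp s [a, b, '*'] h
  norm_num at hs
  conv_rhs => rw [hs]
  simp [List.count_append, ha, hb, hd]

theorem pvCountRight (s : List Char) (b c d : Char) (hb : b ≠ '*') (hc : c ≠ '*') (hd : d ≠ '*')
    (h : -1 < PySem.Chars.find s ['*', b, c]) :
    (s.take (PySem.Chars.find s ['*', b, c]).toNat ++ [d, b, c] ++
      s.drop ((PySem.Chars.find s ['*', b, c]).toNat + 3)).count '*' < s.count '*' := by
  have hs := pvFindDecomp s ['*', b, c] h
  norm_num at hs
  conv_rhs => rw [hs]
  simp [List.count_append, hb, hc, hd]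

-- the while loop of A over the current row string (state: the row and tick);
-- pos_comb = find(comb[tick]); replacement restarts the search, failure moves to the next pattern
def pvLoopA (s : List Char) (tick : Nat) : List Char :=
  if _h4 : tick < 4 then
    if hf : -1 < PySem.Chars.find s (pvComb tick) then
      if _ht01 : tick = 0 ∨ tick = 1 then
        -- m[x] = m[x][:pos+2] + digit + m[x][pos+3:]
        pvLoopA (PySem.List.slice s none (some (PySem.Chars.find s (pvComb tick) + 2)) ++
                 [if tick = 0 then '1' else '0'] ++
                 PySem.List.slice s (some (PySem.Chars.find s (pvComb tick) + 3)) none) tick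
      else
        -- m[x] = m[x][:pos] + digit + m[x][pos+1:]
        pvLoopA (PySem.List.slice s none (some (PySem.Chars.find s (pvComb tick))) ++
                 [if tick = 2 then '1' else '0'] ++
                 PySem.List.slice s (some (PySem.Chars.find s (pvComb tick) + 1)) none) tick
    else
      pvLoopA s (tick + 1)
  else s
termination_by 4 * s.count '*' + (4 - tick)
decreasing_by
  · rcases _ht01 with h0 | h1
    · subst h0
      simp only [pvComb, reduceDIte] at hf ⊢
      rw [pvSliceLeft s '0' '0' '1' hf]
      have := pvCountLeft s '0' '0' '1' (by decide) (by decide) (by decide) hf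
      omega
    · subst h1
      simp only [pvComb] at hf ⊢
      rw [dif_neg (by norm_num : ¬(1:Nat) = 0), pvSliceLeft s '1' '1' '0' hf]
      have := pvCountLeft s '1' '1' '0' (by decide) (by decide) (by decide) hf
      omega
  · have h23 : tick = 2 ∨ tick = 3 := by omega
    rcases h23 with h2 | h3
    · subst h2
      simp only [pvComb, reduceDIte] at hf ⊢
      rw [pvSliceRight s '0' '0' '1' hf]
      have := pvCountRight s '0' '0' '1' (by decide) (by decide) (by decide) hf
      omega
    · subst h3
      simp only [pvComb] at hf ⊢
      rw [dif_neg (by norm_num : ¬(3:Nat) = 2), pvSliceRight s '1' '1' '0' hf]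
      have := pvCountRight s '1' '1' '0' (by decide) (by decide) (by decide) hf
      omega
  · omega

def fill_in_row_by_0110or1001 (m : List String) (x_int : Int) : List String :=
  PySem.List.pySetD m x_int
    (String.ofList (pvLoopA (PySem.List.pyGetD m x_int "").toList 0))

-- ===== PORT B =====

-- one left-to-right scan: on a 3-char window matching the pattern write the replacement and
-- jump 3 cells, otherwise advance 1 cell (Source B's while loop over the char array)
def pvPass (p0 p1 p2 r0 r1 r2 : Char) : List Char → List Char
  | c0 :: c1 :: c2 :: rest =>
    if c0 = p0 ∧ c1 = p1 ∧ c2 = p2 then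
      r0 :: r1 :: r2 :: pvPass p0 p1 p2 r0 r1 r2 rest
    else
      c0 :: pvPass p0 p1 p2 r0 r1 r2 (c1 :: c2 :: rest)
  | s => s
termination_by s => s.length

def pvFillAlt (s : List Char) : List Char :=
  pvPass '*' '1' '1' '0' '1' '1' (pvPass '*' '0' '0' '1' '0' '0'
    (pvPass '1' '1' '*' '1' '1' '0' (pvPass '0' '0' '*' '0' '0' '1' s)))

def fill_in_row_by_0110or1001_alt (m : List String) (x_int : Int) : List String :=
  PySem.List.pySetD m x_int
    (String.ofList (pvFillAlt (PySem.List.pyGetD m x_int "").toList))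

-- ===== PRECONDITION & SPEC =====
-- A raises IndexError when x_int is out of range for m; Pre_ excludes exactly those inputs.
def Pre_fill_in_row_by_0110or1001 (m : List String) (x_int : Int) : Prop :=
  PySem.Raise.InRange m.length x_int
instance (m : List String) (x_int : Int) : Decidable (Pre_fill_in_row_by_0110or1001 m x_int) := by
  unfold Pre_fill_in_row_by_0110or1001; infer_instance

def pvWitness_fill_in_row_by_0110or1001 : List String × Int := (["00*11*", "0*1"], 0)

def Spec_fill_in_row_by_0110or1001 (m : List String) (x_int : Int) (out : List String) : Prop :=
  out = fill_in_row_by_0110or1001_alt m x_int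
instance (m : List String) (x_int : Int) (out : List String) :
    Decidable (Spec_fill_in_row_by_0110or1001 m x_int out) := by
  unfold Spec_fill_in_row_by_0110or1001; infer_instance

-- ===== CLAIM (what is proved, stated in full; the proofs are below) =====
def Claim_equal_fill_in_row_by_0110or1001 : Prop :=
  ∀ (m : List String) (x_int : Int), Dom_fill_in_row_by_0110or1001 m x_int →
    Pre_fill_in_row_by_0110or1001 m x_int →
    Spec_fill_in_row_by_0110or1001 m x_int (fill_in_row_by_0110or1001 m x_int)

-- ===== LEMMAS AND PROOFS =====

-- B-side scan characterisations
theorem pvPass_cons (p0 p1 p2 r0 r1 r2 c : Char) (s : List Char)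
    (h : ¬ [p0, p1, p2] <+: c :: s) :
    pvPass p0 p1 p2 r0 r1 r2 (c :: s) = c :: pvPass p0 p1 p2 r0 r1 r2 s := by
  match s with
  | [] => simp [pvPass]
  | [x] => simp [pvPass]
  | x :: y :: rest =>
    rw [pvPass, if_neg]
    rintro ⟨h0, h1, h2⟩
    exact h ⟨rest, by simp [h0, h1, h2]⟩

theorem pvPass_match (p0 p1 p2 r0 r1 r2 : Char) (t : List Char) :
    pvPass p0 p1 p2 r0 r1 r2 (p0 :: p1 :: p2 :: t) =
      r0 :: r1 :: r2 :: pvPass p0 p1 p2 r0 r1 r2 t := by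
  rw [pvPass, if_pos ⟨rfl, rfl, rfl⟩]

theorem pvPass_id (p0 p1 p2 r0 r1 r2 : Char) (s : List Char)
    (h : ¬ [p0, p1, p2] <:+: s) : pvPass p0 p1 p2 r0 r1 r2 s = s := by
  induction s with
  | nil => simp [pvPass]
  | cons c s' ih =>
    rw [pvPass_cons _ _ _ _ _ _ _ _ (fun hp => h hp.isInfix), ih]
    intro hi
    exact h (hi.trans (List.suffix_cons c s').isInfix)

-- the scan on u ++ pat ++ t, u free of matches, rewrites the first occurrence and goes on with t
theorem pvScan_decomp (p0 p1 p2 r0 r1 r2 : Char) (u t : List Char)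
    (h : ∀ i < u.length, ¬ [p0, p1, p2] <+: (u ++ p0 :: p1 :: p2 :: t).drop i) :
    pvPass p0 p1 p2 r0 r1 r2 (u ++ p0 :: p1 :: p2 :: t) =
      u ++ r0 :: r1 :: r2 :: pvPass p0 p1 p2 r0 r1 r2 t := by
  induction u with
  | nil => simpa using pvPass_match p0 p1 p2 r0 r1 r2 t
  | cons c u' ih =>
    have h0 := h 0 (by simp)
    simp only [List.drop_zero, List.cons_append] at h0
    rw [List.cons_append, pvPass_cons _ _ _ _ _ _ _ _ h0,
        ih (fun i hi => by simpa using h (i + 1) (by simpa using hi))]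
    rfl

-- the scan on u ++ rep ++ t sees no match before t: the replacement creates no new occurrence
theorem pvScan_rep (p0 p1 p2 r0 r1 r2 : Char)
    (hA1 : r0 ≠ p2) (hA2 : r0 ≠ p1 ∨ r1 ≠ p2) (hA3 : ¬ (r0 = p0 ∧ r1 = p1 ∧ r2 = p2))
    (hA4 : r1 ≠ p0 ∨ r2 ≠ p1) (hA5 : r2 ≠ p0) (u t : List Char)
    (h : ∀ i < u.length, ¬ [p0, p1, p2] <+: (u ++ p0 :: p1 :: p2 :: t).drop i) :
    pvPass p0 p1 p2 r0 r1 r2 (u ++ r0 :: r1 :: r2 :: t) =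
      u ++ r0 :: r1 :: r2 :: pvPass p0 p1 p2 r0 r1 r2 t := by
  induction u with
  | nil =>
    simp only [List.nil_append]
    rw [pvPass_cons _ _ _ _ _ _ _ _ (by
          rintro ⟨w, hw⟩
          simp only [List.cons_append, List.cons.injEq, List.nil_append] at hw
          exact hA3 ⟨hw.1.symm, hw.2.1.symm, hw.2.2.1.symm⟩),
        pvPass_cons _ _ _ _ _ _ _ _ (by
          rintro ⟨w, hw⟩
          simp only [List.cons_append, List.cons.injEq, List.nil_append] at hw
          rcases hA4 with hx | hx
          · exact hx hw.1.symm
          · exact hx hw.2.1.symm),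
        pvPass_cons _ _ _ _ _ _ _ _ (by
          rintro ⟨w, hw⟩
          simp only [List.cons_append, List.cons.injEq, List.nil_append] at hw
          exact hA5 hw.1.symm)]
  | cons c u' ih =>
    have hnm : ¬ [p0, p1, p2] <+: c :: (u' ++ r0 :: r1 :: r2 :: t) := by
      match u' with
      | [] =>
        rintro ⟨w, hw⟩
        simp only [List.nil_append, List.cons_append, List.cons.injEq] at hw
        rcases hA2 with hx | hx
        · exact hx hw.2.1.symm
        · exact hx hw.2.2.1.symm
      | [e] =>
        rintro ⟨w, hw⟩
        simp only [List.cons_append, List.nil_append, List.cons.injEq] at hw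
        exact hA1 hw.2.2.1.symm
      | e1 :: e2 :: u'' =>
        rintro ⟨w, hw⟩
        simp only [List.cons_append, List.cons.injEq] at hw
        have h0 := h 0 (by simp)
        simp only [List.drop_zero, List.cons_append] at h0
        exact h0 ⟨u'' ++ p0 :: p1 :: p2 :: t, by simp [hw.1, hw.2.1, hw.2.2.1]⟩
    rw [List.cons_append, pvPass_cons _ _ _ _ _ _ _ _ hnm,
        ih (fun i hi => by simpa using h (i + 1) (by simpa using hi))]
    rfl


-- one unfolding of A's loop per tick
theorem pvUnfoldNone (s : List Char) (tick : Nat) (h4 : tick < 4)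
    (hf : ¬ -1 < PySem.Chars.find s (pvComb tick)) :
    pvLoopA s tick = pvLoopA s (tick + 1) := by
  conv_lhs => rw [pvLoopA]
  rw [dif_pos h4, dif_neg hf]

theorem pvUnfold0 (s : List Char) (hf : -1 < PySem.Chars.find s ['0', '0', '*']) :
    pvLoopA s 0 = pvLoopA (s.take (PySem.Chars.find s ['0', '0', '*']).toNat ++ ['0', '0', '1'] ++
      s.drop ((PySem.Chars.find s ['0', '0', '*']).toNat + 3)) 0 := by
  conv_lhs => rw [pvLoopA]
  simp only [pvComb]
  rw [dif_pos (by norm_num : (0:Nat) < 4), dif_pos hf]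
  norm_num
  congr 1
  simpa using pvSliceLeft s '0' '0' '1' hf

theorem pvUnfold1 (s : List Char) (hf : -1 < PySem.Chars.find s ['1', '1', '*']) :
    pvLoopA s 1 = pvLoopA (s.take (PySem.Chars.find s ['1', '1', '*']).toNat ++ ['1', '1', '0'] ++
      s.drop ((PySem.Chars.find s ['1', '1', '*']).toNat + 3)) 1 := by
  conv_lhs => rw [pvLoopA]
  simp only [pvComb]
  rw [dif_pos (by norm_num : (1:Nat) < 4), dif_pos hf]
  norm_num
  congr 1
  simpa using pvSliceLeft s '1' '1' '0' hf

theorem pvUnfold2 (s : List Char) (hf : -1 < PySem.Chars.find s ['*', '0', '0']) :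
    pvLoopA s 2 = pvLoopA (s.take (PySem.Chars.find s ['*', '0', '0']).toNat ++ ['1', '0', '0'] ++
      s.drop ((PySem.Chars.find s ['*', '0', '0']).toNat + 3)) 2 := by
  conv_lhs => rw [pvLoopA]
  simp only [pvComb]
  rw [dif_pos (by norm_num : (2:Nat) < 4), dif_pos hf]
  norm_num
  congr 1
  simpa using pvSliceRight s '0' '0' '1' hf

theorem pvUnfold3 (s : List Char) (hf : -1 < PySem.Chars.find s ['*', '1', '1']) :
    pvLoopA s 3 = pvLoopA (s.take (PySem.Chars.find s ['*', '1', '1']).toNat ++ ['0', '1', '1'] ++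
      s.drop ((PySem.Chars.find s ['*', '1', '1']).toNat + 3)) 3 := by
  conv_lhs => rw [pvLoopA]
  simp only [pvComb]
  rw [dif_pos (by norm_num : (3:Nat) < 4), dif_pos hf]
  norm_num
  congr 1
  simpa using pvSliceRight s '1' '1' '0' hf

-- one tick of A's loop = one scan of B
theorem pvStep0 : ∀ (n : Nat) (s : List Char), s.count '*' ≤ n →
    pvLoopA s 0 = pvLoopA (pvPass '0' '0' '*' '0' '0' '1' s) 1 := by
  intro n
  induction n with
  | zero =>
    intro s hn
    by_cases hf : -1 < PySem.Chars.find s ['0', '0', '*']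
    · exfalso
      have hs := pvFindDecomp s ['0', '0', '*'] hf
      have hmem : '*' ∈ s := by rw [hs]; simp
      have := List.count_pos_iff.mpr hmem
      omega
    · have hle := PySem.Chars.neg_one_le_find (s := s) (sub := ['0', '0', '*'])
      have hninf := (PySem.Chars.find_eq_neg_one_iff (s := s) (sub := ['0', '0', '*'])).mp (by omega)
      rw [pvUnfoldNone s 0 (by norm_num) hf, pvPass_id _ _ _ _ _ _ _ hninf]
  | succ n ih =>
    intro s hn
    by_cases hf : -1 < PySem.Chars.find s ['0', '0', '*']
    · have hs := pvFindDecomp s ['0', '0', '*'] hf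
      have hlen := pvFindLen s ['0', '0', '*'] hf
      norm_num at hs hlen
      have h0 : 0 ≤ PySem.Chars.find s ['0', '0', '*'] := by omega
      obtain ⟨-, hmin⟩ := PySem.Chars.find_spec (s := s) (sub := ['0', '0', '*']) h0
      have hcnt := pvCountLeft s '0' '0' '1' (by decide) (by decide) (by decide) hf
      rw [pvUnfold0 s hf]
      set n0 := (PySem.Chars.find s ['0', '0', '*']).toNat with hn0
      set u := s.take n0 with hu
      set t := s.drop (n0 + 3) with ht
      have hul : u.length = n0 := by rw [hu, List.length_take]; omega
      have hmin' : ∀ i < u.length, ¬ ['0', '0', '*'] <+: (u ++ '0' :: '0' :: '*' :: t).drop i := by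
        intro i hi
        rw [← hs]
        exact hmin i (hul ▸ hi)
      rw [ih (u ++ ['0', '0', '1'] ++ t) (by omega)]
      congr 1
      conv_rhs => rw [hs]
      rw [show u ++ ['0', '0', '1'] ++ t = u ++ '0' :: '0' :: '1' :: t by simp,
          pvScan_rep '0' '0' '*' '0' '0' '1' (by decide) (by decide) (by decide) (by decide) (by decide) u t hmin',
          pvScan_decomp '0' '0' '*' '0' '0' '1' u t hmin']
    · have hle := PySem.Chars.neg_one_le_find (s := s) (sub := ['0', '0', '*'])
      have hninf := (PySem.Chars.find_eq_neg_one_iff (s := s) (sub := ['0', '0', '*'])).mp (by omega)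
      rw [pvUnfoldNone s 0 (by norm_num) hf, pvPass_id _ _ _ _ _ _ _ hninf]

theorem pvStep1 : ∀ (n : Nat) (s : List Char), s.count '*' ≤ n →
    pvLoopA s 1 = pvLoopA (pvPass '1' '1' '*' '1' '1' '0' s) 2 := by
  intro n
  induction n with
  | zero =>
    intro s hn
    by_cases hf : -1 < PySem.Chars.find s ['1', '1', '*']
    · exfalso
      have hs := pvFindDecomp s ['1', '1', '*'] hf
      have hmem : '*' ∈ s := by rw [hs]; simp
      have := List.count_pos_iff.mpr hmem
      omega
    · have hle := PySem.Chars.neg_one_le_find (s := s) (sub := ['1', '1', '*'])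
      have hninf := (PySem.Chars.find_eq_neg_one_iff (s := s) (sub := ['1', '1', '*'])).mp (by omega)
      rw [pvUnfoldNone s 1 (by norm_num) hf, pvPass_id _ _ _ _ _ _ _ hninf]
  | succ n ih =>
    intro s hn
    by_cases hf : -1 < PySem.Chars.find s ['1', '1', '*']
    · have hs := pvFindDecomp s ['1', '1', '*'] hf
      have hlen := pvFindLen s ['1', '1', '*'] hf
      norm_num at hs hlen
      have h0 : 0 ≤ PySem.Chars.find s ['1', '1', '*'] := by omega
      obtain ⟨-, hmin⟩ := PySem.Chars.find_spec (s := s) (sub := ['1', '1', '*']) h0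
      have hcnt := pvCountLeft s '1' '1' '0' (by decide) (by decide) (by decide) hf
      rw [pvUnfold1 s hf]
      set n0 := (PySem.Chars.find s ['1', '1', '*']).toNat with hn0
      set u := s.take n0 with hu
      set t := s.drop (n0 + 3) with ht
      have hul : u.length = n0 := by rw [hu, List.length_take]; omega
      have hmin' : ∀ i < u.length, ¬ ['1', '1', '*'] <+: (u ++ '1' :: '1' :: '*' :: t).drop i := by
        intro i hi
        rw [← hs]
        exact hmin i (hul ▸ hi)
      rw [ih (u ++ ['1', '1', '0'] ++ t) (by omega)]
      congr 1
      conv_rhs => rw [hs]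
      rw [show u ++ ['1', '1', '0'] ++ t = u ++ '1' :: '1' :: '0' :: t by simp,
          pvScan_rep '1' '1' '*' '1' '1' '0' (by decide) (by decide) (by decide) (by decide) (by decide) u t hmin',
          pvScan_decomp '1' '1' '*' '1' '1' '0' u t hmin']
    · have hle := PySem.Chars.neg_one_le_find (s := s) (sub := ['1', '1', '*'])
      have hninf := (PySem.Chars.find_eq_neg_one_iff (s := s) (sub := ['1', '1', '*'])).mp (by omega)
      rw [pvUnfoldNone s 1 (by norm_num) hf, pvPass_id _ _ _ _ _ _ _ hninf]

theorem pvStep2 : ∀ (n : Nat) (s : List Char), s.count '*' ≤ n →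
    pvLoopA s 2 = pvLoopA (pvPass '*' '0' '0' '1' '0' '0' s) 3 := by
  intro n
  induction n with
  | zero =>
    intro s hn
    by_cases hf : -1 < PySem.Chars.find s ['*', '0', '0']
    · exfalso
      have hs := pvFindDecomp s ['*', '0', '0'] hf
      have hmem : '*' ∈ s := by rw [hs]; simp
      have := List.count_pos_iff.mpr hmem
      omega
    · have hle := PySem.Chars.neg_one_le_find (s := s) (sub := ['*', '0', '0'])
      have hninf := (PySem.Chars.find_eq_neg_one_iff (s := s) (sub := ['*', '0', '0'])).mp (by omega)
      rw [pvUnfoldNone s 2 (by norm_num) hf, pvPass_id _ _ _ _ _ _ _ hninf]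
  | succ n ih =>
    intro s hn
    by_cases hf : -1 < PySem.Chars.find s ['*', '0', '0']
    · have hs := pvFindDecomp s ['*', '0', '0'] hf
      have hlen := pvFindLen s ['*', '0', '0'] hf
      norm_num at hs hlen
      have h0 : 0 ≤ PySem.Chars.find s ['*', '0', '0'] := by omega
      obtain ⟨-, hmin⟩ := PySem.Chars.find_spec (s := s) (sub := ['*', '0', '0']) h0
      have hcnt := pvCountRight s '0' '0' '1' (by decide) (by decide) (by decide) hf
      rw [pvUnfold2 s hf]
      set n0 := (PySem.Chars.find s ['*', '0', '0']).toNat with hn0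
      set u := s.take n0 with hu
      set t := s.drop (n0 + 3) with ht
      have hul : u.length = n0 := by rw [hu, List.length_take]; omega
      have hmin' : ∀ i < u.length, ¬ ['*', '0', '0'] <+: (u ++ '*' :: '0' :: '0' :: t).drop i := by
        intro i hi
        rw [← hs]
        exact hmin i (hul ▸ hi)
      rw [ih (u ++ ['1', '0', '0'] ++ t) (by omega)]
      congr 1
      conv_rhs => rw [hs]
      rw [show u ++ ['1', '0', '0'] ++ t = u ++ '1' :: '0' :: '0' :: t by simp,
          pvScan_rep '*' '0' '0' '1' '0' '0' (by decide) (by decide) (by decide) (by decide) (by decide) u t hmin',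
          pvScan_decomp '*' '0' '0' '1' '0' '0' u t hmin']
    · have hle := PySem.Chars.neg_one_le_find (s := s) (sub := ['*', '0', '0'])
      have hninf := (PySem.Chars.find_eq_neg_one_iff (s := s) (sub := ['*', '0', '0'])).mp (by omega)
      rw [pvUnfoldNone s 2 (by norm_num) hf, pvPass_id _ _ _ _ _ _ _ hninf]

theorem pvStep3 : ∀ (n : Nat) (s : List Char), s.count '*' ≤ n →
    pvLoopA s 3 = pvLoopA (pvPass '*' '1' '1' '0' '1' '1' s) 4 := by
  intro n
  induction n with
  | zero =>
    intro s hn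
    by_cases hf : -1 < PySem.Chars.find s ['*', '1', '1']
    · exfalso
      have hs := pvFindDecomp s ['*', '1', '1'] hf
      have hmem : '*' ∈ s := by rw [hs]; simp
      have := List.count_pos_iff.mpr hmem
      omega
    · have hle := PySem.Chars.neg_one_le_find (s := s) (sub := ['*', '1', '1'])
      have hninf := (PySem.Chars.find_eq_neg_one_iff (s := s) (sub := ['*', '1', '1'])).mp (by omega)
      rw [pvUnfoldNone s 3 (by norm_num) hf, pvPass_id _ _ _ _ _ _ _ hninf]
  | succ n ih =>
    intro s hn
    by_cases hf : -1 < PySem.Chars.find s ['*', '1', '1']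
    · have hs := pvFindDecomp s ['*', '1', '1'] hf
      have hlen := pvFindLen s ['*', '1', '1'] hf
      norm_num at hs hlen
      have h0 : 0 ≤ PySem.Chars.find s ['*', '1', '1'] := by omega
      obtain ⟨-, hmin⟩ := PySem.Chars.find_spec (s := s) (sub := ['*', '1', '1']) h0
      have hcnt := pvCountRight s '1' '1' '0' (by decide) (by decide) (by decide) hf
      rw [pvUnfold3 s hf]
      set n0 := (PySem.Chars.find s ['*', '1', '1']).toNat with hn0
      set u := s.take n0 with hu
      set t := s.drop (n0 + 3) with ht
      have hul : u.length = n0 := by rw [hu, List.length_take]; omega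
      have hmin' : ∀ i < u.length, ¬ ['*', '1', '1'] <+: (u ++ '*' :: '1' :: '1' :: t).drop i := by
        intro i hi
        rw [← hs]
        exact hmin i (hul ▸ hi)
      rw [ih (u ++ ['0', '1', '1'] ++ t) (by omega)]
      congr 1
      conv_rhs => rw [hs]
      rw [show u ++ ['0', '1', '1'] ++ t = u ++ '0' :: '1' :: '1' :: t by simp,
          pvScan_rep '*' '1' '1' '0' '1' '1' (by decide) (by decide) (by decide) (by decide) (by decide) u t hmin',
          pvScan_decomp '*' '1' '1' '0' '1' '1' u t hmin']
    · have hle := PySem.Chars.neg_one_le_find (s := s) (sub := ['*', '1', '1'])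
      have hninf := (PySem.Chars.find_eq_neg_one_iff (s := s) (sub := ['*', '1', '1'])).mp (by omega)
      rw [pvUnfoldNone s 3 (by norm_num) hf, pvPass_id _ _ _ _ _ _ _ hninf]

theorem pvLoopA_eq_fillAlt (s : List Char) : pvLoopA s 0 = pvFillAlt s := by
  rw [pvStep0 (s.count '*') s le_rfl, pvStep1 _ _ le_rfl, pvStep2 _ _ le_rfl,
      pvStep3 _ _ le_rfl, pvLoopA, pvFillAlt, dif_neg (by norm_num : ¬ (4:Nat) < 4)]

-- ===== VERDICT (by name: the statement is the Claim_ definition above) =====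
theorem fill_in_row_by_0110or1001_spec : Claim_equal_fill_in_row_by_0110or1001 := by
  intro m x_int _ _
  unfold Spec_fill_in_row_by_0110or1001 fill_in_row_by_0110or1001 fill_in_row_by_0110or1001_alt
  rw [pvLoopA_eq_fillAlt]
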